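-- pv_equiv track=rewrite | github.com/Consensix-Labs/pyiota | src/pyiota/bcs_types.py | _split_type_params
-- ===== SOURCE A (Python) =====
-- def _split_type_params(params_str: str) -> list[str]:
--     """Split comma-separated type parameters, respecting nested generics."""
--     params = []
--     depth = 0
--     current = ""
--     for ch in params_str:
--         if ch == "<":
--             depth += 1
--             current += ch
--         elif ch == ">":
--             depth -= 1
--             current += ch
--         elif ch == "," and depth == 0:
--             params.append(current.strip())
--             current = ""
--         else:
--             current += ch
--     if current.strip():
--         params.append(current.strip())
--     return params
-- ===== SOURCE B (Python) =====
-- def _split_type_params(params_str: str) -> list[str]: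
--     """Split comma-separated type parameters, respecting nested generics.
--
--     Recursive decomposition: locate the first top-level comma, slice the
--     string there and recurse on the remainder; a final remainder is kept
--     only if it is non-empty after stripping.
--     """
--     depth = 0
--     for i, ch in enumerate(params_str):
--         if ch == "<":
--             depth += 1
--         elif ch == ">":
--             depth -= 1
--         elif ch == "," and depth == 0:
--             return [params_str[:i].strip()] + _split_type_params(params_str[i + 1:])
--     tail = params_str.strip()
--     return [tail] if tail else []
-- ===== Notes on version B (the rewrite author's own statement) =====
-- stated objective: simpler
-- what changed: Replaces A's single-pass accumulator loop (buffer flushed at each top-level comma, depth and partial list carried as state) by a recursive divide: slice the string at the first top-level comma and recurse on the remainder, with no accumulator at all.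
import Mathlib
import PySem

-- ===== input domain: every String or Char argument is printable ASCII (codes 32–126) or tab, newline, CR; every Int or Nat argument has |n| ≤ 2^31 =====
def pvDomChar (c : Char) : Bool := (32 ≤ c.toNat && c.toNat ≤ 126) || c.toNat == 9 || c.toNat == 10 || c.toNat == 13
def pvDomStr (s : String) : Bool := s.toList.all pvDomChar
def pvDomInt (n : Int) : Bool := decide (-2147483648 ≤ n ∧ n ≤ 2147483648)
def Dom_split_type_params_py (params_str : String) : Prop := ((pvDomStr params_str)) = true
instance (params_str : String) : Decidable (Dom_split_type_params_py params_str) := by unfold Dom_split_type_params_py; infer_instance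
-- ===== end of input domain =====

-- B replaces A's flush-at-comma accumulator loop by a recursive divide at the first top-level comma (simpler decomposition; return value only).


-- ===== PORT A =====
-- state: (params, depth, current) exactly as in the Python loop
def pvStepA (st : List (List Char) × Int × List Char) (ch : Char) :
    List (List Char) × Int × List Char :=
  let (params, depth, current) := st
  if ch = '<' then (params, depth + 1, current ++ [ch])
  else if ch = '>' then (params, depth - 1, current ++ [ch])
  else if ch = ',' ∧ depth = 0 then (params ++ [PySem.Chars.strip current], depth, [])
  else (params, depth, current ++ [ch])

def split_type_params_py (params_str : String) : List String :=
  let st := params_str.toList.foldl pvStepA ([], 0, [])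
  let params := st.1
  let current := st.2.2
  (if PySem.Chars.strip current ≠ [] then params ++ [PySem.Chars.strip current]
   else params).map String.ofList

-- ===== PORT B =====
-- B's scan for the first top-level comma; returns (params_str[:i], some params_str[i+1:])
-- at the first comma seen at depth 0, or (params_str, none) if there is none.
def pvCut : List Char → Int → List Char × Option (List Char)
  | [], _ => ([], none)
  | ch :: rest, depth =>
    if ch = ',' ∧ depth = 0 then ([], some rest)
    else
      let d := if ch = '<' then depth + 1 else if ch = '>' then depth - 1 else depth
      let (h, r) := pvCut rest d
      (ch :: h, r)

lemma pvCut_some_length (s : List Char) : ∀ (d : Int) (h r : List Char),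
    pvCut s d = (h, some r) → r.length < s.length := by
  induction s with
  | nil => intro d h r hc; simp [pvCut] at hc
  | cons ch rest ih =>
    intro d h r hc
    simp only [pvCut] at hc
    split at hc
    · cases hc; simp
    · rcases heq : pvCut rest (if ch = '<' then d + 1 else if ch = '>' then d - 1 else d)
        with ⟨h', r'⟩
      rw [heq] at hc
      cases hc
      have := ih _ h' r heq
      simpa using Nat.lt_succ_of_lt this

def pvSplitB (s : List Char) : List (List Char) :=
  match hc : pvCut s 0 with
  | (head, some rest) => PySem.Chars.strip head :: pvSplitB rest
  | (head, none) =>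
      let tail := PySem.Chars.strip head
      if tail ≠ [] then [tail] else []
  termination_by s.length
  decreasing_by exact pvCut_some_length s 0 head rest hc

def split_type_params_py_alt (params_str : String) : List String :=
  (pvSplitB params_str.toList).map String.ofList

-- ===== PRECONDITION & SPEC =====
def Spec_split_type_params_py (params_str : String) (out : List String) : Prop := out = split_type_params_py_alt params_str
instance (params_str : String) (out : List String) : Decidable (Spec_split_type_params_py params_str out) := by unfold Spec_split_type_params_py; infer_instance

-- ===== CLAIM (what is proved, stated in full; the proofs are below) =====
def Claim_equal_split_type_params_py : Prop := ∀ (params_str : String), Dom_split_type_params_py params_str → Spec_split_type_params_py params_str (split_type_params_py params_str)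

-- ===== LEMMAS AND PROOFS =====

-- mediator: the raw top-level segments of s, first segment open at the left
def pvSplitTop : List Char → Int → List (List Char)
  | [], _ => [[]]
  | ch :: rest, depth =>
    if ch = ',' ∧ depth = 0 then [] :: pvSplitTop rest depth
    else
      let d := if ch = '<' then depth + 1 else if ch = '>' then depth - 1 else depth
      match pvSplitTop rest d with
      | [] => [[]]
      | seg :: segs => (ch :: seg) :: segs

lemma pvSplitTop_ne_nil (s : List Char) (d : Int) : pvSplitTop s d ≠ [] := by
  cases s with
  | nil => simp [pvSplitTop]
  | cons ch rest =>
    simp only [pvSplitTop]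
    split
    · simp
    · split <;> simp

-- A's flush-at-comma result, expressed on the segment list
def pvGlue : List Char → List (List Char) → List (List Char)
  | cur, [] => if PySem.Chars.strip cur = [] then [] else [PySem.Chars.strip cur]
  | cur, [seg] => if PySem.Chars.strip (cur ++ seg) = [] then [] else [PySem.Chars.strip (cur ++ seg)]
  | cur, seg :: seg2 :: rest => PySem.Chars.strip (cur ++ seg) :: pvGlue [] (seg2 :: rest)

lemma pvGlue_shift (cur : List Char) (ch : Char) (seg : List Char) (segs : List (List Char)) :
    pvGlue (cur ++ [ch]) (seg :: segs) = pvGlue cur ((ch :: seg) :: segs) := by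
  cases segs <;> simp [pvGlue, List.append_assoc]

lemma foldA_glue (s : List Char) : ∀ (d : Int) (params : List (List Char)) (cur : List Char),
    (let st := s.foldl pvStepA (params, d, cur)
     if PySem.Chars.strip st.2.2 ≠ [] then st.1 ++ [PySem.Chars.strip st.2.2] else st.1)
    = params ++ pvGlue cur (pvSplitTop s d) := by
  induction s with
  | nil =>
    intro d params cur
    simp only [List.foldl_nil, pvSplitTop, pvGlue, List.append_nil]
    split_ifs with h1 h2 <;> simp_all
  | cons ch rest ih =>
    intro d params cur
    by_cases hc : ch = ',' ∧ d = 0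
    · have hlt : ch ≠ '<' := by rintro rfl; exact absurd hc.1 (by decide)
      have hgt : ch ≠ '>' := by rintro rfl; exact absurd hc.1 (by decide)
      simp only [List.foldl_cons, pvStepA, pvSplitTop, if_pos hc, if_neg hlt, if_neg hgt]
      rw [ih]
      obtain ⟨x, xs, hx⟩ := List.exists_cons_of_ne_nil (pvSplitTop_ne_nil rest d)
      rw [hx]
      simp [pvGlue]
    · simp only [List.foldl_cons, pvStepA, pvSplitTop, if_neg hc]
      by_cases hlt : ch = '<'
      · simp only [if_pos hlt]
        rw [ih]
        obtain ⟨seg, segs, hx⟩ := List.exists_cons_of_ne_nil (pvSplitTop_ne_nil rest (d + 1))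
        rw [hx, pvGlue_shift]
      · by_cases hgt : ch = '>'
        · simp only [if_neg hlt, if_pos hgt]
          rw [ih]
          obtain ⟨seg, segs, hx⟩ := List.exists_cons_of_ne_nil (pvSplitTop_ne_nil rest (d - 1))
          rw [hx, pvGlue_shift]
        · simp only [if_neg hlt, if_neg hgt]
          rw [ih]
          obtain ⟨seg, segs, hx⟩ := List.exists_cons_of_ne_nil (pvSplitTop_ne_nil rest d)
          rw [hx, pvGlue_shift]

-- pvSplitTop decomposes through pvCut: head segment, then the segments of the remainder
lemma pvSplitTop_cut (s : List Char) : ∀ (d : Int),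
    pvSplitTop s d =
      (match pvCut s d with
       | (h, none) => [h]
       | (h, some r) => h :: pvSplitTop r 0) := by
  induction s with
  | nil => intro d; simp [pvSplitTop, pvCut]
  | cons ch rest ih =>
    intro d
    by_cases hc : ch = ',' ∧ d = 0
    · simp only [pvSplitTop, pvCut, if_pos hc]
      rw [hc.2]
    · simp only [pvSplitTop, pvCut, if_neg hc]
      rw [ih]
      rcases heq : pvCut rest (if ch = '<' then d + 1 else if ch = '>' then d - 1 else d)
        with ⟨h', r'⟩
      cases r' <;> simp

lemma pvSplitB_eq_glue (s : List Char) : pvSplitB s = pvGlue [] (pvSplitTop s 0) := by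
  rw [pvSplitB, pvSplitTop_cut s 0]
  split
  · rename_i head rest heq
    rw [heq]
    dsimp only
    obtain ⟨seg, segs, hx⟩ := List.exists_cons_of_ne_nil (pvSplitTop_ne_nil rest 0)
    rw [hx]
    simp only [pvGlue, List.nil_append]
    rw [← hx, ← pvSplitB_eq_glue rest]
  · rename_i head heq
    rw [heq]
    dsimp only
    simp only [pvGlue, List.nil_append]
    split_ifs with h1 h2 <;> simp_all
  termination_by s.length
  decreasing_by exact pvCut_some_length s 0 _ _ (by assumption)

-- ===== VERDICT (by name: the statement is the Claim_ definition above) =====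
theorem split_type_params_py_spec : Claim_equal_split_type_params_py := by
  intro s _
  unfold Spec_split_type_params_py split_type_params_py split_type_params_py_alt
  have hA := foldA_glue s.toList 0 [] []
  simp only [List.nil_append] at hA
  simp only [hA, pvSplitB_eq_glue]
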